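-- pv_equiv track=rewrite | github.com/hopper-project/hoptex | demacro.py | take_word
-- ===== SOURCE A (Python) =====
-- def take_word(text):
--     word = []
--     for character in text:
--         if character in ' \t\n\\':
--             break
--         else:
--             word.append(character)
--     return(''.join(word),text[len(word):])
-- ===== SOURCE B (Python) =====
-- def take_word(text):
--     idx = min((p for p in (text.find(c) for c in ' \t\n\\') if p != -1),
--               default=len(text))
--     return (text[:idx], text[idx:])
-- ===== Notes on version B (the rewrite author's own statement) =====
-- stated objective: idiomatic
-- what changed: Replaces the per-character accumulation loop with a min over str.find positions of the four delimiters (default len) followed by a single slice split.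
import Mathlib
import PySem

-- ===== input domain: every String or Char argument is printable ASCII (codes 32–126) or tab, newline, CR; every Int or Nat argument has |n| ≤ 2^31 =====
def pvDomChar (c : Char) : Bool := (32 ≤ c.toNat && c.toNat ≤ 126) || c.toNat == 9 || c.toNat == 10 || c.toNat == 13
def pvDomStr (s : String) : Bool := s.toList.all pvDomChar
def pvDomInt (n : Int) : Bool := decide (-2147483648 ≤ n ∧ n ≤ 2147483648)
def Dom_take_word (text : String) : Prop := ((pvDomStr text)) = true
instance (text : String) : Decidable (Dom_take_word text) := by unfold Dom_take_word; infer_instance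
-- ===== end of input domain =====

-- B replaces A's per-character accumulation loop (break at the first delimiter) by a min over
-- the str.find positions of the four delimiter characters (default len) and one slice split.

-- ===== PORT A =====
-- the 'for character in text: if character in " \t\n\\": break else word.append(character)' loop
def take_word_loop : List Char → List Char → List Char
  | [], word => word
  | c :: rest, word =>
    if ([' ', '\t', '\n', '\\'].contains c) then word
    else take_word_loop rest (word ++ [c])

def take_word (text : String) : String × String :=
  let word := take_word_loop text.toList []
  -- ''.join(word) is String.ofList word; text[len(word):] is the PySem slice
  (String.ofList word,
   String.ofList (PySem.List.slice text.toList (some ((word.length : Nat) : Int)) none))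

-- ===== PORT B =====
def take_word_alt (text : String) : String × String :=
  -- idx = min((p for p in (text.find(c) for c in ' \t\n\\') if p != -1), default=len(text))
  let finds := [' ', '\t', '\n', '\\'].map (fun c => PySem.Str.find text (String.ofList [c]))
  let idx := PySem.List.minD (finds.filter (fun p => p != -1)) id (PySem.Str.len text)
  -- (text[:idx], text[idx:])
  (String.ofList (PySem.List.slice text.toList none (some idx)),
   String.ofList (PySem.List.slice text.toList (some idx) none))

-- ===== PRECONDITION & SPEC =====
def Spec_take_word (text : String) (out : String × String) : Prop := out = take_word_alt text
instance (text : String) (out : String × String) : Decidable (Spec_take_word text out) := by unfold Spec_take_word; infer_instance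

-- ===== CLAIM (what is proved, stated in full; the proofs are below) =====
def Claim_equal_take_word : Prop := ∀ (text : String), Dom_take_word text → Spec_take_word text (take_word text)

-- ===== LEMMAS AND PROOFS =====

theorem take_word_loop_eq (cs acc : List Char) :
    take_word_loop cs acc
      = acc ++ cs.take (cs.findIdx (fun c => [' ', '\t', '\n', '\\'].contains c)) := by
  induction cs generalizing acc with
  | nil => simp [take_word_loop]
  | cons x t ih =>
    by_cases hx : ([' ', '\t', '\n', '\\'].contains x) = true
    · simp only [take_word_loop, List.findIdx_cons]
      rw [if_pos (by simpa using hx)]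
      have hx' : x = ' ' ∨ x = '\t' ∨ x = '\n' ∨ x = '\\' := by simpa using hx
      have hb : (decide (x = ' ') || (decide (x = '\t') || (decide (x = '\n') || decide (x = '\\')))) = true := by
        rcases hx' with h | h | h | h <;> simp [h]
      simp [hb]
    · simp only [take_word_loop, List.findIdx_cons]
      rw [if_neg (by simpa using hx)]
      have hx' : ¬(x = ' ' ∨ x = '\t' ∨ x = '\n' ∨ x = '\\') := by simpa using hx
      rw [not_or, not_or, not_or] at hx'
      have hb : (decide (x = ' ') || (decide (x = '\t') || (decide (x = '\n') || decide (x = '\\')))) = false := by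
        simp [hx'.1, hx'.2.1, hx'.2.2.1, hx'.2.2.2]
      rw [ih]
      simp [hb]

theorem find_go_single (c : Char) (cs : List Char) (k : Nat) :
    PySem.Chars.find.go [c] cs k
      = match cs.findIdx? (fun x => x == c) with
        | some i => ((k + i : Nat) : Int)
        | none => -1 := by
  induction cs generalizing k with
  | nil => rfl
  | cons x t ih =>
    show (if [c].isPrefixOf (x :: t) then (k : Int) else PySem.Chars.find.go [c] t (k + 1)) = _
    rw [List.findIdx?_cons]
    by_cases hcx : (x == c) = true
    · have hcx' : (c == x) = true := by
        have h : x = c := by simpa using hcx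
        simp [h]
      simp [List.isPrefixOf, hcx, hcx']
    · have hne : ¬ x = c := by simpa using hcx
      have hcx' : (c == x) = false := beq_eq_false_iff_ne.mpr (fun h => hne h.symm)
      have hcxf : (x == c) = false := by simpa using hne
      simp only [List.isPrefixOf, hcx', Bool.false_and, if_false, hcxf, Bool.false_eq_true]
      rw [ih]
      cases h : t.findIdx? (fun x => x == c) with
      | none => simp
      | some i =>
        simp only [Option.map_some]
        push_cast
        ring_nf

theorem find_single (c : Char) (cs : List Char) :
    PySem.Chars.find cs [c]
      = match cs.findIdx? (fun x => x == c) with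
        | some i => ((i : Nat) : Int)
        | none => -1 := by
  show PySem.Chars.find.go [c] cs 0 = _
  rw [find_go_single]
  cases h : cs.findIdx? (fun x => x == c) <;> simp

theorem foldl_min_map_add_one (l : List Int) (acc : Option Int) :
    List.foldl (fun acc x => match acc with
        | none => some x
        | some m => if id x < id m then some x else some m)
      (acc.map (fun v => v + 1)) (l.map (fun v => v + 1))
    = (List.foldl (fun acc x => match acc with
        | none => some x
        | some m => if id x < id m then some x else some m)
      acc l).map (fun v => v + 1) := by
  induction l generalizing acc with
  | nil => simp
  | cons x t ih =>
    cases acc with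
    | none => simpa using ih (some x)
    | some m =>
      simp only [List.map_cons, List.foldl_cons, Option.map_some, id]
      by_cases h : x < m
      · rw [if_pos (by omega), if_pos h]; exact ih (some x)
      · rw [if_neg (by omega), if_neg h]; exact ih (some m)

theorem min?_int_eq_foldl (l : List Int) :
    PySem.List.min? l id = List.foldl (fun acc x => match acc with
        | none => some x
        | some m => if id x < id m then some x else some m) none l := by
  unfold PySem.List.min?
  congr 1
  funext acc x
  cases acc <;> rfl

theorem min?_map_add_one (l : List Int) :
    PySem.List.min? (l.map (fun v => v + 1)) id
      = (PySem.List.min? l id).map (fun v => v + 1) := by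
  rw [min?_int_eq_foldl, min?_int_eq_foldl]
  simpa using foldl_min_map_add_one l none

theorem foldl_min_ne_none (l : List Int) (acc : Option Int) (h : acc ≠ none) :
    List.foldl (fun acc x => match acc with
        | none => some x
        | some m => if id x < id m then some x else some m)
      acc l ≠ none := by
  induction l generalizing acc with
  | nil => exact h
  | cons x t ih =>
    cases acc with
    | none => exact absurd rfl h
    | some m =>
      simp only [List.foldl_cons]
      by_cases hx : id x < id m
      · rw [if_pos hx]; exact ih _ (by simp)
      · rw [if_neg hx]; exact ih _ (by simp)

theorem min?_isSome_of_mem {l : List Int} {x : Int} (hx : x ∈ l) :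
    ∃ m, PySem.List.min? l id = some m := by
  cases h : PySem.List.min? l id with
  | some m => exact ⟨m, rfl⟩
  | none =>
    cases l with
    | nil => cases hx
    | cons y t =>
      have h' : List.foldl (fun acc x => match acc with
          | none => some x
          | some m => if id x < id m then some x else some m)
          (some y) t = none := by
        rw [min?_int_eq_foldl] at h
        simpa using h
      exact absurd h' (foldl_min_ne_none t (some y) (by simp))

theorem filter_map_find_cons (x : Char) (t : List Char) (ds : List Char)
    (hx : ∀ c ∈ ds, ¬ x = c) :
    ((ds.map (fun c => PySem.Chars.find (x :: t) [c])).filter (fun p => p != -1))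
      = ((ds.map (fun c => PySem.Chars.find t [c])).filter (fun p => p != -1)).map
          (fun v => v + 1) := by
  induction ds with
  | nil => rfl
  | cons d ds' ih =>
    have hd : (x == d) = false := beq_eq_false_iff_ne.mpr (hx d (by simp))
    have hrest := ih (fun c hc => hx c (by simp [hc]))
    simp only [List.map_cons, List.filter_cons]
    rw [find_single, find_single, List.findIdx?_cons, hd]
    simp only [Bool.false_eq_true, if_false]
    cases h : t.findIdx? (fun y => y == d) with
    | none => simpa [h] using hrest
    | some i =>
      have h1 : (((i : Nat) : Int) != -1) = true := by simp
      have h2 : ((Nat.cast (i + 1) : Int) != -1) = true := by simp; omega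
      simp only [Option.map_some]
      rw [if_pos h2, if_pos h1]
      simp only [List.map_cons, hrest]
      congr 1

theorem find_nil (c : Char) : PySem.Chars.find [] [c] = -1 := rfl

theorem min_finds (ds : List Char) (cs : List Char) :
    PySem.List.minD ((ds.map (fun c => PySem.Chars.find cs [c])).filter (fun p => p != -1))
        id ((cs.length : Int))
      = ((cs.findIdx (fun c => ds.contains c) : Nat) : Int) := by
  induction cs with
  | nil =>
    have hmap : (ds.map (fun c => PySem.Chars.find ([] : List Char) [c])) = ds.map (fun _ => (-1 : Int)) := by
      simp [find_nil]
    rw [hmap]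
    have hfil : ((ds.map (fun _ => (-1 : Int))).filter (fun p => p != -1)) = [] := by
      induction ds with
      | nil => rfl
      | cons d ds' ihd => simpa using ihd
    rw [hfil]
    rfl
  | cons x t ih =>
    by_cases hx : (ds.contains x) = true
    · have hxmem : x ∈ ds := by simpa using hx
      have hfindx : PySem.Chars.find (x :: t) [x] = 0 := by
        rw [find_single, List.findIdx?_cons]
        simp
      have h0mem : (0 : Int) ∈ ((ds.map (fun c => PySem.Chars.find (x :: t) [c])).filter (fun p => p != -1)) := by
        rw [List.mem_filter]
        exact ⟨List.mem_map.mpr ⟨x, hxmem, hfindx⟩, by simp⟩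
      obtain ⟨m, hm⟩ := min?_isSome_of_mem h0mem
      have hmle : m ≤ 0 := PySem.List.min?_isMin hm 0 h0mem
      have hmmem := PySem.List.min?_mem hm
      have hmge : 0 ≤ m := by
        rw [List.mem_filter] at hmmem
        obtain ⟨hmap, hne⟩ := hmmem
        obtain ⟨c, _, hc⟩ := List.mem_map.mp hmap
        have hge : -1 ≤ PySem.Chars.find (x :: t) [c] := by
          rw [find_single]
          cases (x :: t).findIdx? (fun y => y == c) with
          | none => exact le_rfl
          | some i => show (-1 : Int) ≤ ((i : Nat) : Int); omega
        rw [hc] at hge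
        simp only [bne_iff_ne, ne_eq] at hne
        omega
      have hm0 : m = 0 := le_antisymm hmle hmge
      show (PySem.List.min? _ id).getD _ = _
      rw [hm, hm0]
      simp [List.findIdx_cons, hxmem]
    · have hxne : ∀ c ∈ ds, ¬ x = c := by
        intro c hc h
        exact hx (by simpa [h] using List.elem_eq_true_of_mem hc)
      rw [filter_map_find_cons x t ds hxne]
      have hshift : PySem.List.minD
          (((ds.map (fun c => PySem.Chars.find t [c])).filter (fun p => p != -1)).map (fun v => v + 1))
          id (((x :: t).length : Int))
        = PySem.List.minD ((ds.map (fun c => PySem.Chars.find t [c])).filter (fun p => p != -1))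
            id ((t.length : Int)) + 1 := by
        show (PySem.List.min? _ id).getD _ = (PySem.List.min? _ id).getD _ + 1
        rw [min?_map_add_one]
        cases PySem.List.min? ((ds.map (fun c => PySem.Chars.find t [c])).filter (fun p => p != -1)) id with
        | none => simp
        | some v => simp
      rw [hshift, ih]
      have hxmem' : ¬ x ∈ ds := by simpa using hx
      rw [List.findIdx_cons]
      simp [hxmem']

theorem take_word_eq_alt (text : String) : take_word text = take_word_alt text := by
  unfold take_word take_word_alt
  have hmap : ([' ', '\t', '\n', '\\'].map (fun c => PySem.Str.find text (String.ofList [c])))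
      = [' ', '\t', '\n', '\\'].map (fun c => PySem.Chars.find text.toList [c]) := by
    simp [PySem.Str.find_eq]
  simp only [hmap, PySem.Str.len_eq]
  rw [min_finds]
  set k := text.toList.findIdx (fun c => [' ', '\t', '\n', '\\'].contains c) with hk
  have hkle : k ≤ text.toList.length := List.findIdx_le_length
  rw [take_word_loop_eq, ← hk]
  have hlen : ((List.take k text.toList).length : Nat) = k := by
    rw [List.length_take]
    omega
  rw [List.nil_append, hlen, PySem.List.slice_from_natCast, PySem.List.slice_to_natCast]

-- ===== VERDICT (by name: the statement is the Claim_ definition above) =====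
theorem take_word_spec : Claim_equal_take_word := by
  intro text _
  unfold Spec_take_word
  exact take_word_eq_alt text
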